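-- pv_equiv track=rewrite | github.com/nemakgregor/SCUCa | src/scuc_sr/tuning.py | _sanitize_instance_name
-- ===== SOURCE A (Python) =====
-- def _sanitize_instance_name(s: str) -> str:
--     s = s.strip().strip("/\\").replace("\\", "/")
--     out = []
--     for ch in s:
--         out.append(ch if ch.isalnum() else "_")
--     t = "".join(out)
--     while "__" in t:
--         t = t.replace("__", "_")
--     return t.strip("_").lower()
-- ===== SOURCE B (Python) =====
-- def _sanitize_instance_name(s: str) -> str:
--     s = s.strip().strip("/\\").replace("\\", "/")
--     pieces = []
--     i = 0
--     n = len(s)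
--     while i < n:
--         if s[i].isalnum():
--             pieces.append(s[i])
--             i += 1
--         else:
--             pieces.append("_")
--             while i < n and not s[i].isalnum():
--                 i += 1
--     return "".join(pieces).strip("_").lower()
-- ===== Notes on version B (the rewrite author's own statement) =====
-- stated objective: alternative
-- what changed: Replaces the per-char map plus the repeated collapse-replace loop with a single run-based pass that emits alnum characters verbatim and one underscore per maximal non-alnum run, then strips and lowercases once.
import Mathlib
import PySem

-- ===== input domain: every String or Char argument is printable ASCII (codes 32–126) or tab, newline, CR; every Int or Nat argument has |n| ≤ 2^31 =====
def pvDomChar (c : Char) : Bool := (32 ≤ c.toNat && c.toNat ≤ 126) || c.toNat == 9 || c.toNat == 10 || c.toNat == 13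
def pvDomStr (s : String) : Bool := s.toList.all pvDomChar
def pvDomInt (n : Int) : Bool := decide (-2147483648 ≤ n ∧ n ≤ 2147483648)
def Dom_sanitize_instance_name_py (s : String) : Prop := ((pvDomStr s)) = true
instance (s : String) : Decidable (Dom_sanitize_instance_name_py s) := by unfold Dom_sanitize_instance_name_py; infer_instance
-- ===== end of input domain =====

-- B replaces A's per-char map plus repeated collapse-replace loop with a single run-based pass (alternative algorithm, same measured cost).

-- ===== PORT A =====
-- helper for A's while-loop termination: one replace pass written out structurally (spec of Chars.replace on "__"/"_")
def pvRep : List Char → List Char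
  | [] => []
  | '_' :: '_' :: t => '_' :: pvRep t
  | c :: t => c :: pvRep t

theorem pvRep_length_le (t : List Char) : (pvRep t).length ≤ t.length := by
  induction t using pvRep.induct <;> simp [pvRep] <;> omega

theorem pvRep_cons_of_not {c : Char} {t : List Char} (h : ¬ ['_', '_'] <+: (c :: t)) :
    pvRep (c :: t) = c :: pvRep t := by
  rw [pvRep.eq_def]
  split
  · rename_i he; cases he
  · rename_i t' he; exact absurd (by rw [he]; simp) h
  · rename_i c' t' hx heq
    injection heq with h1 h2
    subst h1; subst h2; rfl

theorem pvGo_eq_rep (fuel : Nat) (l acc : List Char) (h : l.length ≤ fuel) :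
    PySem.Chars.replace.go ['_', '_'] ['_'] fuel l acc = acc.reverse ++ pvRep l := by
  induction fuel generalizing l acc with
  | zero =>
    have : l = [] := List.length_eq_zero_iff.mp (Nat.le_zero.mp h)
    subst this; simp [PySem.Chars.replace.go, pvRep]
  | succ n ih =>
    match l with
    | [] => simp [PySem.Chars.replace.go, pvRep]
    | c :: t =>
      rw [PySem.Chars.replace.go]
      by_cases hp : ['_', '_'] <+: (c :: t)
      · have hb : ['_', '_'].isPrefixOf (c :: t) = true := by
          rw [List.isPrefixOf_iff_prefix]; exact hp
        rw [if_pos hb]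
        obtain ⟨r, hr⟩ := hp
        have hc : c = '_' := by injection hr with h1 _; exact h1.symm
        have ht : t = '_' :: r := by injection hr with _ h2; exact h2.symm
        subst hc; subst ht
        have hlen : r.length ≤ n := by simp at h; omega
        rw [show (['_', '_'] : List Char).length = 2 from rfl]
        simp only [List.drop_succ_cons, List.drop_zero]
        rw [ih r _ hlen]
        simp [pvRep]
      · have hb : ['_', '_'].isPrefixOf (c :: t) = false := by
          rw [Bool.eq_false_iff]; intro hx
          exact hp (List.isPrefixOf_iff_prefix.mp hx)
        rw [if_neg (by simp [hb])]
        have hlen : t.length ≤ n := by simp at h; omega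
        rw [ih t _ hlen, pvRep_cons_of_not hp]
        simp

theorem pvReplace_eq_rep (t : List Char) :
    PySem.Chars.replace t ['_', '_'] ['_'] = pvRep t := by
  rw [PySem.Chars.replace]
  simp only [List.isEmpty_cons]
  exact pvGo_eq_rep t.length t [] le_rfl

theorem pvRep_length_lt {t : List Char} (h : ['_', '_'] <:+: t) :
    (pvRep t).length < t.length := by
  induction t using pvRep.induct with
  | case1 => simp at h
  | case2 t' ih =>
    have := pvRep_length_le t'
    simp [pvRep]; omega
  | case3 c t' hne ih =>
    have hcons : ¬ ['_', '_'] <+: (c :: t') := by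
      intro hp
      obtain ⟨r, hr⟩ := hp
      injection hr with h1 h2
      exact hne r h1.symm h2.symm
    have ht' : ['_', '_'] <:+: t' := by
      rcases List.infix_cons_iff.mp h with h1 | h2
      · exact absurd h1 hcons
      · exact h2
    rw [pvRep_cons_of_not hcons]
    simp only [List.length_cons]
    exact Nat.succ_lt_succ (ih ht')

theorem pvReplace_length_lt {t : List Char} (h : PySem.Chars.isIn ['_', '_'] t = true) :
    (PySem.Chars.replace t ['_', '_'] ['_']).length < t.length := by
  rw [pvReplace_eq_rep]
  exact pvRep_length_lt ((PySem.Chars.isIn_iff_infix _ _).mp h)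

-- A's 'while "__" in t: t = t.replace("__", "_")' loop
def collapseA (t : List Char) : List Char :=
  if h : PySem.Chars.isIn ['_', '_'] t = true then
    collapseA (PySem.Chars.replace t ['_', '_'] ['_'])
  else t
termination_by t.length
decreasing_by exact pvReplace_length_lt h

def sanitize_instance_name_py (s : String) : String :=
  let s1 := PySem.Str.replace (PySem.Str.stripChars (PySem.Str.strip s) "/\\") "\\" "/"
  let out := s1.toList.foldl (fun acc ch => acc ++ [if PySem.Chars.isalnum ch then ch else '_']) []
  let t := collapseA out
  String.ofList (PySem.Chars.lower (PySem.Chars.stripChars t ['_']))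

-- ===== PORT B =====
-- one pass over maximal runs: alnum chars verbatim, one '_' per non-alnum run
def pvRuns (t : List Char) : List Char :=
  match t with
  | [] => []
  | c :: rest =>
    if PySem.Chars.isalnum c then c :: pvRuns rest
    else '_' :: pvRuns (rest.dropWhile (fun x => !PySem.Chars.isalnum x))
termination_by t.length
decreasing_by
  · simp
  · exact Nat.lt_succ_of_le (List.length_dropWhile_le _ _)

def sanitize_instance_name_py_alt (s : String) : String :=
  let s1 := PySem.Str.replace (PySem.Str.stripChars (PySem.Str.strip s) "/\\") "\\" "/"
  String.ofList (PySem.Chars.lower (PySem.Chars.stripChars (pvRuns s1.toList) ['_']))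

-- ===== PRECONDITION & SPEC =====
def Spec_sanitize_instance_name_py (s : String) (out : String) : Prop := out = sanitize_instance_name_py_alt s
instance (s : String) (out : String) : Decidable (Spec_sanitize_instance_name_py s out) := by unfold Spec_sanitize_instance_name_py; infer_instance

-- ===== CLAIM (what is proved, stated in full; the proofs are below) =====
def Claim_equal_sanitize_instance_name_py : Prop := ∀ (s : String), Dom_sanitize_instance_name_py s → Spec_sanitize_instance_name_py s (sanitize_instance_name_py s)

-- ===== LEMMAS AND PROOFS =====

-- canonical squeezer: 'prev' records whether the previously emitted char was '_'
def pvSq (prev : Bool) : List Char → List Char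
  | [] => []
  | c :: t =>
    if c = '_' then (if prev then pvSq true t else '_' :: pvSq true t)
    else c :: pvSq false t

theorem pvSq_rep (b : Bool) (t : List Char) : pvSq b (pvRep t) = pvSq b t := by
  induction t using pvRep.induct generalizing b with
  | case1 => rfl
  | case2 t' ih =>
    cases b <;> simp [pvRep, pvSq, ih]
  | case3 c t' hne ih =>
    have hcons : ¬ ['_', '_'] <+: (c :: t') := by
      intro hp; obtain ⟨r, hr⟩ := hp
      injection hr with h1 h2
      exact hne r h1.symm h2.symm
    rw [pvRep_cons_of_not hcons]
    by_cases hc : c = '_'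
    · subst hc; cases b <;> simp [pvSq, ih]
    · cases b <;> simp [pvSq, hc, ih]

theorem pvSq_fixed (t : List Char) : ∀ (b : Bool), ¬ ['_', '_'] <:+: t →
    (b = true → t.head? ≠ some '_') → pvSq b t = t := by
  induction t with
  | nil => intro b _ _; rfl
  | cons c t ih =>
    intro b h hb
    have ht : ¬ ['_', '_'] <:+: t := fun hx => h (List.infix_cons_iff.mpr (Or.inr hx))
    by_cases hc : c = '_'
    · subst hc
      have hbf : b = false := by
        cases b with
        | false => rfl
        | true => exact absurd (show ('_' :: t).head? = some '_' by simp) (hb rfl)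
      subst hbf
      have hth : t.head? ≠ some '_' := by
        intro hh
        cases t with
        | nil => simp at hh
        | cons d t' =>
          simp at hh; subst hh
          exact h (List.infix_cons_iff.mpr (Or.inl (by simp)))
      simp [pvSq, ih true ht (fun _ => hth)]
    · simp only [pvSq, if_neg hc]
      rw [ih false ht (fun hx => nomatch hx)]

theorem pvCollapseA_eq_sq (t : List Char) : collapseA t = pvSq false t := by
  induction t using collapseA.induct with
  | case1 t h ih =>
    rw [collapseA, dif_pos h]
    rw [ih, pvReplace_eq_rep, pvSq_rep]
  | case2 t h =>
    rw [collapseA, dif_neg h]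
    rw [pvSq_fixed t false ((PySem.Chars.isIn_eq_false_iff _ _).mp (Bool.eq_false_iff.mpr h))
      (fun hx => nomatch hx)]

-- A's per-char classifier
def pvF (ch : Char) : Char := if PySem.Chars.isalnum ch then ch else '_'

theorem pvAlnum_ne_underscore {c : Char} (h : PySem.Chars.isalnum c = true) : c ≠ '_' := by
  intro he; subst he; simp [PySem.Chars.isalnum, PySem.Chars.isalpha, PySem.Chars.isdigit,
    PySem.Chars.isupper, PySem.Chars.islower] at h

theorem pvSq_true_drop (t : List Char) :
    pvSq true (t.map pvF) = pvSq false ((t.dropWhile (fun x => !PySem.Chars.isalnum x)).map pvF) := by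
  induction t with
  | nil => rfl
  | cons c t ih =>
    by_cases hc : PySem.Chars.isalnum c
    · have hcf : pvF c = c := by simp [pvF, hc]
      rw [List.dropWhile_cons_of_neg (by simp [hc])]
      simp only [List.map_cons, hcf, pvSq, if_neg (pvAlnum_ne_underscore hc)]
    · have hcf : pvF c = '_' := by simp [pvF, hc]
      rw [List.dropWhile_cons_of_pos (by simp [hc])]
      simp only [List.map_cons, hcf, pvSq]
      exact ih

theorem pvRuns_eq_sq_map (t : List Char) : pvRuns t = pvSq false (t.map pvF) := by
  induction t using pvRuns.induct with
  | case1 => simp [pvRuns, pvSq]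
  | case2 c rest hc ih =>
    have hcf : pvF c = c := by simp [pvF, hc]
    rw [pvRuns, if_pos hc]
    simp [hcf, pvSq, pvAlnum_ne_underscore hc, ih]
  | case3 c rest hc ih =>
    have hcf : pvF c = '_' := by simp [pvF, hc]
    rw [pvRuns, if_neg hc]
    simp only [List.map_cons, hcf, pvSq]
    rw [pvSq_true_drop, ← ih]
    simp

theorem pvFoldl_map (l : List Char) :
    l.foldl (fun acc ch => acc ++ [if PySem.Chars.isalnum ch then ch else '_']) [] = l.map pvF := by
  rw [PySem.List.foldl_append_singleton_eq_map]
  rfl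

-- ===== VERDICT (by name: the statement is the Claim_ definition above) =====
theorem sanitize_instance_name_py_spec : Claim_equal_sanitize_instance_name_py := by
  intro s _
  show _ = _
  unfold sanitize_instance_name_py sanitize_instance_name_py_alt
  simp only [pvFoldl_map, pvCollapseA_eq_sq, ← pvRuns_eq_sq_map]
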